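-- pv_equiv track=rewrite | github.com/huisuSeo/algorithm | 코드처리하기.py | solution
-- ===== SOURCE A (Python) =====
-- def solution(code):
--     ret = []
--     mode = 0
--     for i in range(len(code)):
--         if mode == 0:
--             if code[i] == "1":
--                 mode = 1
--             elif i % 2 == 0:
--                 ret.append(code[i])
--         else:
--             if code[i] == "1":
--                 mode = 0
--             elif i % 2 == 1:
--                 ret.append(code[i])
--
--     ret = ''.join(ret)
--
--     answer = "EMPTY"
--
--     if len(ret) != 0:
--         answer = ret
--
--     return answer
-- ===== SOURCE B (Python) =====
-- def solution(code):
--     out = []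
--     idx = 0
--     for k, seg in enumerate(code.split("1")):
--         for ch in seg:
--             if idx % 2 == k % 2:
--                 out.append(ch)
--             idx += 1
--         idx += 1  # skip the "1" delimiter after this segment
--     ret = ''.join(out)
--     return ret if ret else "EMPTY"
-- ===== Notes on version B (the rewrite author's own statement) =====
-- stated objective: alternative
-- what changed: B replaces A's per-character mode-toggling state machine with a split of the code string on the toggle delimiter character: the k-th resulting segment is processed in mode k mod 2, keeping only characters whose running global index has that parity.
import Mathlib
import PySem

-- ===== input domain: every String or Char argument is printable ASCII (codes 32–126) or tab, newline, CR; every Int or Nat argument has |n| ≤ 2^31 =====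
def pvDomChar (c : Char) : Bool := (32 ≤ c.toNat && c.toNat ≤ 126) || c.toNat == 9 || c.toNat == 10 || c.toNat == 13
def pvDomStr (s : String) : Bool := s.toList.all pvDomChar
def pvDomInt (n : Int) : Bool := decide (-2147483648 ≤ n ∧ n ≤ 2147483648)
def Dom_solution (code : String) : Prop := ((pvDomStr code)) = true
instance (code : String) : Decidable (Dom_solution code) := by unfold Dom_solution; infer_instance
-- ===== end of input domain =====

-- B re-implements A's char-by-char mode-toggling machine by splitting on the '1' delimiter and
-- filtering each segment by the parity of a running global index (same cost, different decomposition).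

-- ===== PORT A =====
def solutionStep (s : List Char × Int) (p : Int × Char) : List Char × Int :=
  if s.2 == 0 then
    if p.2 == '1' then (s.1, 1)
    else if PySem.Int.mod p.1 2 == 0 then (s.1 ++ [p.2], s.2)
    else s
  else
    if p.2 == '1' then (s.1, 0)
    else if PySem.Int.mod p.1 2 == 1 then (s.1 ++ [p.2], s.2)
    else s

def solution (code : String) : String :=
  let st := (PySem.List.enumerate code.toList 0).foldl solutionStep ([], 0)
  let ret := String.ofList st.1
  let answer := "EMPTY"
  if ret.length ≠ 0 then ret else answer

-- ===== PORT B =====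
def solutionAltStep (s : List Char × Int) (p : Int × List Char) : List Char × Int :=
  let r := p.2.foldl (fun (t : List Char × Int) ch =>
    ((if PySem.Int.mod t.2 2 == PySem.Int.mod p.1 2 then t.1 ++ [ch] else t.1), t.2 + 1)) s
  (r.1, r.2 + 1)

def solution_alt (code : String) : String :=
  let segs := code.toList.splitOn '1'
  let st := (PySem.List.enumerate segs 0).foldl solutionAltStep ([], 0)
  let ret := String.ofList st.1
  if ret.isEmpty then "EMPTY" else ret

-- ===== PRECONDITION & SPEC =====
def Spec_solution (code : String) (out : String) : Prop := out = solution_alt code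
instance (code : String) (out : String) : Decidable (Spec_solution code out) := by unfold Spec_solution; infer_instance

-- ===== CLAIM (what is proved, stated in full; the proofs are below) =====
def Claim_equal_solution : Prop := ∀ (code : String), Dom_solution code → Spec_solution code (solution code)

-- ===== LEMMAS AND PROOFS =====

-- common specification: keep characters whose index parity equals the current mode parity; '1' toggles
def pvG : List Char → Nat → Nat → List Char
  | [], _, _ => []
  | c :: cs, i, m =>
    if c = '1' then pvG cs (i + 1) (m + 1)
    else (if i % 2 = m % 2 then [c] else []) ++ pvG cs (i + 1) m

-- per-segment filter used by the B-side characterisation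
def pvProc : List Char → Nat → Nat → List Char
  | [], _, _ => []
  | c :: cs, i, k => (if i % 2 = k % 2 then [c] else []) ++ pvProc cs (i + 1) k

-- segment-list recursion matching B's two nested loops
def pvBR : List (List Char) → Nat → Nat → List Char
  | [], _, _ => []
  | s :: rest, i, k => pvProc s i k ++ pvBR rest (i + s.length + 1) (k + 1)

theorem pvMod2 (i : Nat) : PySem.Int.mod (i : Int) 2 = ((i % 2 : Nat) : Int) := by
  rw [PySem.Int.mod_eq_emod_of_pos (by norm_num)]; omega

theorem pvA_fold (cs : List Char) : ∀ (i m : Nat) (ret : List Char),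
    (PySem.List.enumerate cs (i : Int)).foldl solutionStep (ret, ((m % 2 : Nat) : Int)) =
      (ret ++ pvG cs i m, (((m + cs.count '1') % 2 : Nat) : Int)) := by
  induction cs with
  | nil => intro i m ret; simp [pvG]
  | cons c cs ih =>
    intro i m ret
    rw [PySem.List.enumerate_cons, List.foldl_cons,
        show (i : Int) + 1 = ((i + 1 : Nat) : Int) by push_cast; ring]
    by_cases hc : c = '1'
    · have hstep : solutionStep (ret, ((m % 2 : Nat) : Int)) ((i : Int), c) =
          (ret, (((m + 1) % 2 : Nat) : Int)) := by
        rcases Nat.mod_two_eq_zero_or_one m with hm | hm <;>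
          simp only [solutionStep, hm, hc] <;> norm_num <;> omega
      rw [hstep, ih (i + 1) (m + 1) ret]
      subst hc
      simp only [pvG, if_pos rfl, Prod.mk.injEq]
      refine ⟨rfl, ?_⟩
      have : (m + 1 + cs.count '1') % 2 = (m + ('1' :: cs).count '1') % 2 := by
        simp [List.count_cons]
        omega
      rw [this]
    · have hstep : solutionStep (ret, ((m % 2 : Nat) : Int)) ((i : Int), c) =
          ((if i % 2 = m % 2 then ret ++ [c] else ret), ((m % 2 : Nat) : Int)) := by
        rcases Nat.mod_two_eq_zero_or_one m with hm | hm <;>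
        rcases Nat.mod_two_eq_zero_or_one i with hi | hi <;>
          simp only [solutionStep, pvMod2, hm, hi, hc] <;> norm_num <;> exact hc
      rw [hstep]
      by_cases hp : i % 2 = m % 2
      · rw [if_pos hp, ih (i + 1) m (ret ++ [c])]
        simp [pvG, hc, hp, List.count_cons]
      · rw [if_neg hp, ih (i + 1) m ret]
        simp [pvG, hc, hp, List.count_cons]

theorem pvB_inner (seg : List Char) : ∀ (i k : Nat) (out : List Char),
    seg.foldl (fun (t : List Char × Int) ch =>
        ((if PySem.Int.mod t.2 2 == PySem.Int.mod ((k : Int)) 2 then t.1 ++ [ch] else t.1), t.2 + 1))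
      (out, (i : Int)) =
      (out ++ pvProc seg i k, ((i + seg.length : Nat) : Int)) := by
  induction seg with
  | nil => intro i k out; simp [pvProc]
  | cons c cs ih =>
    intro i k out
    rw [List.foldl_cons]
    have hstep : ((if PySem.Int.mod ((i : Int)) 2 == PySem.Int.mod ((k : Int)) 2
          then out ++ [c] else out), ((i : Int)) + 1) =
        (((if i % 2 = k % 2 then out ++ [c] else out) : List Char), ((i + 1 : Nat) : Int)) := by
      rw [pvMod2, pvMod2]
      by_cases hik : i % 2 = k % 2
      · simp only [hik, beq_self_eq_true, if_pos, if_true, Prod.mk.injEq]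
        constructor
        · trivial
        · push_cast; ring
      · have : (((i % 2 : Nat) : Int) == ((k % 2 : Nat) : Int)) = false := by
          simp only [beq_eq_false_iff_ne, ne_eq, Nat.cast_inj]
          exact hik
        simp only [this, hik, if_false, Bool.false_eq_true, Prod.mk.injEq]
        constructor
        · trivial
        · push_cast; ring
    simp only [hstep]
    have hn : ((i + 1) + cs.length : Nat) = (i + (c :: cs).length : Nat) := by
      simp [List.length_cons]; omega
    by_cases hp : i % 2 = k % 2
    · rw [if_pos hp, ih (i + 1) k (out ++ [c]), hn]
      have hl : (out ++ [c]) ++ pvProc cs (i + 1) k = out ++ pvProc (c :: cs) i k := by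
        simp [pvProc, hp]
      rw [hl]
    · rw [if_neg hp, ih (i + 1) k out, hn]
      have hl : out ++ pvProc cs (i + 1) k = out ++ pvProc (c :: cs) i k := by
        simp [pvProc, hp]
      rw [hl]

theorem pvB_fold (segs : List (List Char)) : ∀ (i k : Nat) (out : List Char),
    ∃ e, (PySem.List.enumerate segs (k : Int)).foldl solutionAltStep (out, (i : Int)) =
      (out ++ pvBR segs i k, e) := by
  induction segs with
  | nil => intro i k out; exact ⟨(i : Int), by simp [pvBR]⟩
  | cons s rest ih =>
    intro i k out
    rw [PySem.List.enumerate_cons]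
    simp only [List.foldl_cons, solutionAltStep, pvBR]
    rw [pvB_inner s i k out]
    have : ((i + s.length : Nat) : Int) + 1 = ((i + s.length + 1 : Nat) : Int) := by push_cast; ring
    rw [this, show ((k : Int) + 1) = ((k + 1 : Nat) : Int) by push_cast; ring]
    obtain ⟨e, he⟩ := ih (i + s.length + 1) (k + 1) (out ++ pvProc s i k)
    exact ⟨e, by rw [he]; simp⟩

theorem pv_split_g (cs : List Char) : ∀ (i k : Nat), pvBR (cs.splitOn '1') i k = pvG cs i k := by
  induction cs with
  | nil => intro i k; rw [List.splitOn, List.splitOnP_nil]; simp [pvBR, pvProc, pvG]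
  | cons c cs ih =>
    intro i k
    by_cases hc : c = '1'
    · simp only [List.splitOn, List.splitOnP_cons] at *
      simp only [hc, pvG, if_pos rfl]
      norm_num
      rw [show pvBR ([] :: List.splitOnP (fun b => b == '1') cs) i k =
            pvBR (List.splitOnP (fun b => b == '1') cs) (i + 1) (k + 1) by simp [pvBR, pvProc]]
      exact ih (i + 1) (k + 1)
    · simp only [List.splitOn, List.splitOnP_cons] at *
      have hne := List.splitOnP_ne_nil (fun b => b == '1') cs
      obtain ⟨h, t, hht⟩ : ∃ h t, List.splitOnP (fun b => b == '1') cs = h :: t := by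
        cases hsp : List.splitOnP (fun b => b == '1') cs with
        | nil => exact absurd hsp hne
        | cons a b => exact ⟨a, b, rfl⟩
      simp only [hc, beq_iff_eq, if_false, hht, List.modifyHead, pvG, pvBR, pvProc, List.length_cons]
      rw [show i + (h.length + 1) + 1 = (i + 1) + h.length + 1 by ring]
      have := ih (i + 1) k
      rw [hht] at this
      simp only [pvBR] at this
      rw [List.append_assoc, this]

theorem pvA_char (code : String) :
    solution code =
      (if (pvG code.toList 0 0).length ≠ 0 then String.ofList (pvG code.toList 0 0) else "EMPTY") := by
  have h := pvA_fold code.toList 0 0 []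
  norm_num at h
  simp only [solution, h, String.length_ofList]

theorem pvB_char (code : String) :
    solution_alt code =
      (if (pvG code.toList 0 0).length ≠ 0 then String.ofList (pvG code.toList 0 0) else "EMPTY") := by
  obtain ⟨e, he⟩ := pvB_fold (code.toList.splitOn '1') 0 0 []
  norm_num at he
  simp only [solution_alt, he, pv_split_g]
  have hie : (String.ofList (pvG code.toList 0 0)).isEmpty = (pvG code.toList 0 0).isEmpty := by
    cases h : pvG code.toList 0 0 <;> simp [String.isEmpty]
  rw [hie]
  cases h : pvG code.toList 0 0 <;> simp

-- ===== VERDICT (by name: the statement is the Claim_ definition above) =====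
theorem solution_spec : Claim_equal_solution := by
  intro code _
  unfold Spec_solution
  rw [pvA_char, pvB_char]
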